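-- pv_equiv track=rewrite | github.com/Duivilly/SRI | pages/views_bic_001.py | normalizeListBic
-- ===== SOURCE A (Python) =====
-- def normalizeListBic(strList):
-- 	strList= strList.split(',')
-- 	l= list()
-- 	for i in range(len(strList)):
-- 		n= strList[i].replace("'","")
-- 		n= n.replace(" ","")
-- 		n= n.replace("[","")
-- 		n= n.replace("]","")
-- 		l.append(n)
-- 	return l
-- ===== SOURCE B (Python) =====
-- def normalizeListBic(strList):
-- 	out = []
-- 	cur = []
-- 	for ch in strList:
-- 		if ch == ',':
-- 			out.append(''.join(cur))
-- 			cur = []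
-- 		elif ch not in "' []":
-- 			cur.append(ch)
-- 	out.append(''.join(cur))
-- 	return out
-- ===== Notes on version B (the rewrite author's own statement) =====
-- stated objective: alternative
-- what changed: B is a single-pass character state machine: one loop over the raw string accumulates the current piece, flushes it at each comma, and skips quote/space/bracket characters as they stream by, instead of A's split-into-pieces followed by four replace passes over each piece.
import Mathlib
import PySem

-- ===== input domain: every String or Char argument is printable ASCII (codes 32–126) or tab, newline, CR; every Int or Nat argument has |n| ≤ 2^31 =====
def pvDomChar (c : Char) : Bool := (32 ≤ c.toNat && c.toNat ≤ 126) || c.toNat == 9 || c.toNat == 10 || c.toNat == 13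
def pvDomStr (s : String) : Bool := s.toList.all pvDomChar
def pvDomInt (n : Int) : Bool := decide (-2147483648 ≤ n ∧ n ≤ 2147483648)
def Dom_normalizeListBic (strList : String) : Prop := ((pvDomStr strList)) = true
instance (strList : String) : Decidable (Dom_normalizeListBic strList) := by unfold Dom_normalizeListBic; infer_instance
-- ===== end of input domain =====

-- B re-processes the string as a single-pass state machine (accumulate current piece, flush
-- at each comma, skip quote/space/brackets) instead of A's split-then-four-replaces loop; objective: alternative.


-- ===== PORT A =====
-- the body of A's loop: n = strList[i].replace("'","").replace(" ","").replace("[","").replace("]","")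
def pvCleanA (s : String) : String :=
  let n := PySem.Str.replace s "'" ""
  let n := PySem.Str.replace n " " ""
  let n := PySem.Str.replace n "[" ""
  let n := PySem.Str.replace n "]" ""
  n

def normalizeListBic (strList : String) : List String :=
  let parts := (PySem.Str.split? strList ",").getD []  -- sep = "," is nonempty, so split? is always some
  (PySem.List.pyRange 0 (PySem.List.len parts)).foldl
    (fun l i => l ++ [pvCleanA (PySem.List.pyGetD parts i "")]) []

-- ===== PORT B =====
-- 'ch not in "\' []"'
def pvKeep (c : Char) : Bool := !(c == '\'' || c == ' ' || c == '[' || c == ']')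

-- B's loop: out/cur accumulator over the characters, flush cur at each comma, keep only pvKeep chars
def pvScan : List Char → List Char → List String
  | [], cur => [String.ofList cur]
  | c :: t, cur =>
      if c = ',' then String.ofList cur :: pvScan t []
      else if pvKeep c then pvScan t (cur ++ [c])
      else pvScan t cur

def normalizeListBic_alt (strList : String) : List String :=
  pvScan strList.toList []

-- ===== PRECONDITION & SPEC =====
def Spec_normalizeListBic (strList : String) (out : List String) : Prop := out = normalizeListBic_alt strList
instance (strList : String) (out : List String) : Decidable (Spec_normalizeListBic strList out) := by unfold Spec_normalizeListBic; infer_instance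

-- ===== CLAIM (what is proved, stated in full; the proofs are below) =====
def Claim_equal_normalizeListBic : Prop := ∀ (strList : String), Dom_normalizeListBic strList → Spec_normalizeListBic strList (normalizeListBic strList)

-- ===== LEMMAS AND PROOFS =====

-- simple reference splitter on a single-character separator
def pvSp (d : Char) : List Char → List (List Char)
  | [] => [[]]
  | c :: t => if c = d then [] :: pvSp d t else (pvSp d t).modifyHead (c :: ·)

theorem pvSp_ne_nil (d : Char) : ∀ l : List Char, pvSp d l ≠ [] := by
  intro l
  induction l with
  | nil => simp [pvSp]
  | cons c t ih =>
      simp only [pvSp]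
      split
      · simp
      · cases hp : pvSp d t with
        | nil => exact absurd hp ih
        | cons a r => simp

theorem pvSp_exists_cons (d : Char) (l : List Char) : ∃ h r, pvSp d l = h :: r := by
  cases hp : pvSp d l with
  | nil => exact absurd hp (pvSp_ne_nil d l)
  | cons a r => exact ⟨a, r, rfl⟩

theorem go_single (d : Char) : ∀ (fuel : Nat) (l cur : List Char) (acc : List (List Char)),
    l.length ≤ fuel →
    PySem.Chars.splitOn.go [d] fuel l cur acc
      = acc.reverse ++ (pvSp d l).modifyHead (cur.reverse ++ ·) := by
  intro fuel
  induction fuel with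
  | zero =>
      intro l cur acc hl
      have : l = [] := List.length_eq_zero_iff.mp (Nat.le_zero.mp hl)
      subst this
      simp [PySem.Chars.splitOn.go, pvSp]
  | succ fuel ih =>
      intro l cur acc hl
      cases l with
      | nil => simp [PySem.Chars.splitOn.go, pvSp]
      | cons c rest =>
          simp only [PySem.Chars.splitOn.go]
          by_cases hcd : c = d
          · subst hcd
            have hpre : [c].isPrefixOf (c :: rest) = true := by simp [List.isPrefixOf]
            rw [if_pos hpre]
            simp only [List.length_singleton, List.drop_one, List.tail_cons]
            rw [ih rest [] (cur.reverse :: acc) (by simpa using Nat.le_of_succ_le_succ hl)]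
            obtain ⟨h, r, hp⟩ := pvSp_exists_cons c rest
            simp [pvSp, hp]
          · have hpre : [d].isPrefixOf (c :: rest) = false := by
              simp [List.isPrefixOf]
              exact fun h => absurd h.symm hcd
            rw [if_neg (by simp [hpre])]
            rw [ih rest (c :: cur) acc (by simpa using Nat.le_of_succ_le_succ hl)]
            obtain ⟨h, r, hp⟩ := pvSp_exists_cons d rest
            simp [pvSp, hp, hcd]

theorem splitOn_single (d : Char) (l : List Char) :
    PySem.Chars.splitOn l [d] = pvSp d l := by
  unfold PySem.Chars.splitOn
  rw [go_single d (l.length + 1) l [] [] (Nat.le_succ _)]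
  obtain ⟨h, r, hp⟩ := pvSp_exists_cons d l
  simp [hp]

theorem replace_go_single (c : Char) : ∀ (fuel : Nat) (l acc : List Char),
    l.length ≤ fuel →
    PySem.Chars.replace.go [c] [] fuel l acc = acc.reverse ++ l.filter (· != c) := by
  intro fuel
  induction fuel with
  | zero =>
      intro l acc hl
      have : l = [] := List.length_eq_zero_iff.mp (Nat.le_zero.mp hl)
      subst this
      simp [PySem.Chars.replace.go]
  | succ fuel ih =>
      intro l acc hl
      cases l with
      | nil => simp [PySem.Chars.replace.go]
      | cons a rest =>
          simp only [PySem.Chars.replace.go]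
          by_cases hac : a = c
          · subst hac
            have hpre : [a].isPrefixOf (a :: rest) = true := by simp [List.isPrefixOf]
            rw [if_pos hpre]
            simp only [List.length_singleton, List.drop_one, List.tail_cons, List.reverse_nil,
              List.nil_append]
            rw [ih rest acc (by simpa using Nat.le_of_succ_le_succ hl)]
            simp [List.filter]
          · have hpre : [c].isPrefixOf (a :: rest) = false := by
              simp [List.isPrefixOf]
              exact fun h => absurd h.symm hac
            rw [if_neg (by simp [hpre])]
            rw [ih rest (a :: acc) (by simpa using Nat.le_of_succ_le_succ hl)]
            have hb : (a != c) = true := bne_iff_ne.mpr hac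
            simp [List.filter, hb]

theorem replace_single (c : Char) (l : List Char) :
    PySem.Chars.replace l [c] [] = l.filter (· != c) := by
  unfold PySem.Chars.replace
  rw [if_neg (by simp)]
  exact replace_go_single c l.length l [] le_rfl

theorem pvCleanA_ofList (p : List Char) :
    pvCleanA (String.ofList p) = String.ofList (p.filter pvKeep) := by
  unfold pvCleanA
  show PySem.Str.replace (PySem.Str.replace (PySem.Str.replace (PySem.Str.replace
      (String.ofList p) "'" "") " " "") "[" "") "]" "" = _
  simp only [PySem.Str.replace, String.toList_ofList]
  have h1 : ("'" : String).toList = ['\''] := rfl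
  have h2 : (" " : String).toList = [' '] := rfl
  have h3 : ("[" : String).toList = ['['] := rfl
  have h4 : ("]" : String).toList = [']'] := rfl
  have h0 : ("" : String).toList = [] := rfl
  rw [h1, h2, h3, h4, h0]
  rw [replace_single, replace_single, replace_single, replace_single]
  congr 1
  simp only [List.filter_filter]
  apply List.filter_congr
  intro a _
  unfold pvKeep
  simp only [bne, Bool.not_or]
  simp [Bool.and_comm, Bool.and_assoc]

theorem foldl_append_map {α β : Type} (f : α → β) :
    ∀ (l : List α) (init : List β),
      l.foldl (fun acc x => acc ++ [f x]) init = init ++ l.map f := by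
  intro l
  induction l with
  | nil => simp
  | cons x t ih => intro init; simp [List.foldl_cons, ih]

-- B's state machine computes exactly "split at commas then filter pvKeep in each piece"
theorem pvScan_eq_sp : ∀ (t cur : List Char) (h : List Char) (r : List (List Char)),
    pvSp ',' t = h :: r →
    pvScan t cur = String.ofList (cur ++ h.filter pvKeep)
      :: r.map (fun p => String.ofList (p.filter pvKeep)) := by
  intro t
  induction t with
  | nil =>
      intro cur h r hp
      simp only [pvSp] at hp
      cases hp
      simp [pvScan]
  | cons c t ih =>
      intro cur h r hp
      by_cases hc : c = ','
      · subst hc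
        simp only [pvSp, if_pos rfl] at hp
        cases hp
        obtain ⟨h', r', hp'⟩ := pvSp_exists_cons ',' t
        simp only [pvScan, if_pos rfl]
        rw [ih [] h' r' hp', hp']
        simp
      · obtain ⟨h', r', hp'⟩ := pvSp_exists_cons ',' t
        rw [pvSp, if_neg hc, hp'] at hp
        simp only [List.modifyHead_cons] at hp
        injection hp with e1 e2
        subst e1; subst e2
        by_cases hk : pvKeep c = true
        · simp only [pvScan, if_neg hc, hk, if_pos trivial, if_true]
          rw [ih (cur ++ [c]) h' r' hp']
          simp [List.filter_cons, hk]
        · have hk' : pvKeep c = false := by simpa using hk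
          simp only [pvScan, if_neg hc, hk', Bool.false_eq_true, if_false]
          rw [ih cur h' r' hp']
          simp [List.filter_cons, hk']

-- ===== VERDICT (by name: the statement is the Claim_ definition above) =====
theorem normalizeListBic_spec : Claim_equal_normalizeListBic := by
  intro s _
  unfold Spec_normalizeListBic normalizeListBic normalizeListBic_alt
  have hsep : (("," : String).toList) = [','] := rfl
  simp only [PySem.Str.split?, hsep, PySem.Chars.split?,
    List.isEmpty_cons, Bool.false_eq_true, if_false, Option.map_some, Option.getD_some]
  rw [PySem.List.foldl_pyRange_pyGetD _ "" (fun l p => l ++ [pvCleanA p]) [] le_rfl]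
  simp only [Int.toNat_zero, List.drop_zero]
  rw [foldl_append_map, List.nil_append]
  rw [splitOn_single]
  obtain ⟨h, r, hp⟩ := pvSp_exists_cons ',' s.toList
  rw [pvScan_eq_sp s.toList [] h r hp, hp]
  simp only [List.map_cons, List.map_map, List.nil_append]
  refine congrArg₂ List.cons ?_ ?_
  · exact pvCleanA_ofList h
  · apply List.map_congr_left
    intro p _
    simpa [Function.comp] using pvCleanA_ofList p
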